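-- pv_equiv track=rewrite | github.com/jrennie99-glitch/superagent-v8 | api/production_validator.py | _get_security_recommendations
-- ===== SOURCE A (Python) =====
-- from typing import Dict, List, Any, Optional
--
-- def _get_security_recommendations(issues: List[str]) -> List[str]:
--     """Get security recommendations based on issues"""
--     recommendations = []
--     for issue in issues:
--         if 'sql_injection' in issue:
--             recommendations.append("Use parameterized queries or ORM")
--         elif 'xss' in issue:
--             recommendations.append("Sanitize user input and escape output")
--         elif 'csrf' in issue:
--             recommendations.append("Implement CSRF tokens")
--         elif 'rate_limiting' in issue:
--             recommendations.append("Add rate limiting middleware")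
--     return recommendations
-- ===== SOURCE B (Python) =====
-- _TABLE = [
--     ("sql_injection", "Use parameterized queries or ORM"),
--     ("xss", "Sanitize user input and escape output"),
--     ("csrf", "Implement CSRF tokens"),
--     ("rate_limiting", "Add rate limiting middleware"),
-- ]
--
-- def _get_security_recommendations(issues):
--     # keyword-major: one pass per keyword over a parallel slot array,
--     # filling only still-empty slots, then compact.
--     best = [None] * len(issues)
--     for key, rec in _TABLE:
--         best = [b if b is not None else (rec if key in issue else None)
--                 for b, issue in zip(best, issues)]
--     return [b for b in best if b is not None]
-- ===== Notes on version B (the rewrite author's own statement) =====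
-- stated objective: alternative
-- what changed: Inverts the loop nesting: instead of an if/elif chain per issue, B makes one pass per keyword over a parallel slot array, filling only still-empty slots (so earlier-keyword passes take priority), then compacts the non-empty slots.
import Mathlib
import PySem

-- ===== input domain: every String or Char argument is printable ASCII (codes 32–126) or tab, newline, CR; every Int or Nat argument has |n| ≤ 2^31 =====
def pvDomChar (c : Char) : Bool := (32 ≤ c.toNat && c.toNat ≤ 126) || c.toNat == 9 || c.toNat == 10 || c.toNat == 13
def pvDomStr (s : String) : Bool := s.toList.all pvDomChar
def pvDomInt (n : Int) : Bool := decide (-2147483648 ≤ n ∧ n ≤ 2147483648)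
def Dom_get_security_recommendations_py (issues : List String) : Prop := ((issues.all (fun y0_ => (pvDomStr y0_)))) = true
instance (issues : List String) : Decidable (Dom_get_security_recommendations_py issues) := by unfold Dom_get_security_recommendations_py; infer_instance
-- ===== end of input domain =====

-- B inverts the loops: one pass per keyword over a parallel slot array (fill-if-empty), then compact; alternative structure, same cost.


-- ===== PORT A =====
-- Port of A: accumulator loop with the if/elif chain, one append per matching issue.
def get_security_recommendations_py (issues : List String) : List String :=
  issues.foldl (fun recommendations issue =>
    if PySem.Str.isIn "sql_injection" issue then
      recommendations ++ ["Use parameterized queries or ORM"]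
    else if PySem.Str.isIn "xss" issue then
      recommendations ++ ["Sanitize user input and escape output"]
    else if PySem.Str.isIn "csrf" issue then
      recommendations ++ ["Implement CSRF tokens"]
    else if PySem.Str.isIn "rate_limiting" issue then
      recommendations ++ ["Add rate limiting middleware"]
    else recommendations) []

-- ===== PORT B =====
-- Port of B: keyword-major passes over a parallel Option slot list, then compact.
def pvTable : List (String × String) :=
  [("sql_injection", "Use parameterized queries or ORM"),
   ("xss", "Sanitize user input and escape output"),
   ("csrf", "Implement CSRF tokens"),
   ("rate_limiting", "Add rate limiting middleware")]

-- one pass for keyword `key`: fill still-empty slots whose issue contains `key`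
def pvPass (key rec : String) (best : List (Option String)) (issues : List String) : List (Option String) :=
  (best.zip issues).map (fun p =>
    match p.1 with
    | some b => some b
    | none => if PySem.Str.isIn key p.2 then some rec else none)

def get_security_recommendations_py_alt (issues : List String) : List String :=
  (pvTable.foldl (fun best kr => pvPass kr.1 kr.2 best issues)
    (issues.map (fun _ => none))).filterMap id

-- ===== PRECONDITION & SPEC =====
def Spec_get_security_recommendations_py (issues : List String) (out : List String) : Prop := out = get_security_recommendations_py_alt issues
instance (issues : List String) (out : List String) : Decidable (Spec_get_security_recommendations_py issues out) := by unfold Spec_get_security_recommendations_py; infer_instance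

-- ===== CLAIM (what is proved, stated in full; the proofs are below) =====
def Claim_equal_get_security_recommendations_py : Prop := ∀ (issues : List String), Dom_get_security_recommendations_py issues → Spec_get_security_recommendations_py issues (get_security_recommendations_py issues)

-- ===== LEMMAS AND PROOFS =====

-- per-slot step of a pass
def pvStep (o : Option String) (kr : String × String) (issue : String) : Option String :=
  match o with
  | some b => some b
  | none => if PySem.Str.isIn kr.1 issue then some kr.2 else none

lemma pvPass_cons (kr : String × String) (b : Option String) (bs : List (Option String))
    (i : String) (is : List String) :
    pvPass kr.1 kr.2 (b :: bs) (i :: is) = pvStep b kr i :: pvPass kr.1 kr.2 bs is := by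
  cases b <;> simp [pvPass, pvStep]

lemma pvPass_nil (k r : String) (bs : List (Option String)) :
    pvPass k r bs [] = [] := by
  simp [pvPass]

-- the fold of passes acts slot-wise
lemma pv_fold_cons (t : List (String × String)) (b : Option String) (bs : List (Option String))
    (i : String) (is : List String) :
    t.foldl (fun best kr => pvPass kr.1 kr.2 best (i :: is)) (b :: bs)
      = (t.foldl (fun o kr => pvStep o kr i) b)
        :: t.foldl (fun best kr => pvPass kr.1 kr.2 best is) bs := by
  induction t generalizing b bs with
  | nil => rfl
  | cons kr rest ih =>
      simp only [List.foldl_cons]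
      rw [pvPass_cons, ih]

lemma pv_fold_nil (t : List (String × String)) :
    t.foldl (fun best kr => pvPass kr.1 kr.2 best []) [] = ([] : List (Option String)) := by
  induction t with
  | nil => rfl
  | cons kr rest ih => rw [List.foldl_cons, pvPass_nil, ih]

-- the whole pipeline computes, per issue, the fold of steps over the table
lemma pv_main (issues : List String) :
    pvTable.foldl (fun best kr => pvPass kr.1 kr.2 best issues) (issues.map (fun _ => none))
      = issues.map (fun i => pvTable.foldl (fun o kr => pvStep o kr i) none) := by
  induction issues with
  | nil => simpa using pv_fold_nil pvTable
  | cons i is ih => rw [List.map_cons, List.map_cons, pv_fold_cons, ih]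

-- A's if/elif chain produces exactly the per-issue slot, as an appended toList
lemma pv_step_chain (issue : String) (acc : List String) :
    (if PySem.Str.isIn "sql_injection" issue then
      acc ++ ["Use parameterized queries or ORM"]
    else if PySem.Str.isIn "xss" issue then
      acc ++ ["Sanitize user input and escape output"]
    else if PySem.Str.isIn "csrf" issue then
      acc ++ ["Implement CSRF tokens"]
    else if PySem.Str.isIn "rate_limiting" issue then
      acc ++ ["Add rate limiting middleware"]
    else acc)
    = acc ++ (pvTable.foldl (fun o kr => pvStep o kr issue) none).toList := by
  simp only [pvTable, List.foldl_cons, List.foldl_nil, pvStep]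
  split_ifs <;> simp_all

lemma pv_foldl_A (issues : List String) (acc : List String) :
    issues.foldl (fun recommendations issue =>
      if PySem.Str.isIn "sql_injection" issue then
        recommendations ++ ["Use parameterized queries or ORM"]
      else if PySem.Str.isIn "xss" issue then
        recommendations ++ ["Sanitize user input and escape output"]
      else if PySem.Str.isIn "csrf" issue then
        recommendations ++ ["Implement CSRF tokens"]
      else if PySem.Str.isIn "rate_limiting" issue then
        recommendations ++ ["Add rate limiting middleware"]
      else recommendations) acc
    = acc ++ issues.flatMap (fun i => (pvTable.foldl (fun o kr => pvStep o kr i) none).toList) := by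
  induction issues generalizing acc with
  | nil => simp
  | cons h t ih => rw [List.foldl_cons, pv_step_chain, ih, List.append_assoc, List.flatMap_cons]

lemma pv_flatMap_toList (l : List String) (f : String → Option String) :
    l.flatMap (fun i => (f i).toList) = l.filterMap f := by
  induction l with
  | nil => rfl
  | cons i is ih =>
      rw [List.flatMap_cons, List.filterMap_cons, ih]
      cases h : f i <;> simp [h]

-- ===== VERDICT (by name: the statement is the Claim_ definition above) =====
theorem get_security_recommendations_py_spec : Claim_equal_get_security_recommendations_py := by
  intro issues _
  unfold Spec_get_security_recommendations_py get_security_recommendations_py get_security_recommendations_py_alt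
  rw [pv_main, pv_foldl_A, List.nil_append, List.filterMap_map, Function.id_comp,
    pv_flatMap_toList]
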